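-- pv_equiv track=rewrite | github.com/maateonicolas/buscaminas-marie | src/generador_tablero.py | crear_mascara_rombo
-- ===== SOURCE A (Python) =====
-- from typing import List, Optional, Sequence, Tuple
--
-- Mascara = List[List[int]]
--
-- def crear_mascara_rombo(filas: int = 16, columnas: int = 16) -> Mascara:
--     """
--     Genera una forma de rombo centrada.
--     """
--     centro_f = filas // 2
--     centro_c = columnas // 2
--     radio = min(filas, columnas) // 2
--
--     mascara = [[0 for _ in range(columnas)] for _ in range(filas)]
--     for i in range(filas):
--         for j in range(columnas):
--             if abs(i - centro_f) + abs(j - centro_c) <= radio: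
--                 mascara[i][j] = 1
--     return mascara
-- ===== SOURCE B (Python) =====
-- from typing import List
--
-- Mascara = List[List[int]]
--
-- def crear_mascara_rombo(filas: int = 16, columnas: int = 16) -> Mascara:
--     """Per-row span fill: compute the inclusive column span of the diamond for
--     each row and set only that slice, instead of testing every cell."""
--     centro_f = filas // 2
--     centro_c = columnas // 2
--     radio = min(filas, columnas) // 2
--     mascara = []
--     for i in range(filas):
--         fila = [0] * columnas
--         budget = radio - abs(i - centro_f)
--         if budget >= 0:
--             lo = max(0, centro_c - budget)
--             hi = min(columnas - 1, centro_c + budget)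
--             for j in range(lo, hi + 1):
--                 fila[j] = 1
--         mascara.append(fila)
--     return mascara
-- ===== Notes on version B (the rewrite author's own statement) =====
-- stated objective: alternative
-- what changed: Replaces the per-cell Manhattan-distance test over the full grid by a per-row computation of the diamond's inclusive column span (clamped to the grid), filling only that slice of a fresh zero row and appending rows.
import Mathlib
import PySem

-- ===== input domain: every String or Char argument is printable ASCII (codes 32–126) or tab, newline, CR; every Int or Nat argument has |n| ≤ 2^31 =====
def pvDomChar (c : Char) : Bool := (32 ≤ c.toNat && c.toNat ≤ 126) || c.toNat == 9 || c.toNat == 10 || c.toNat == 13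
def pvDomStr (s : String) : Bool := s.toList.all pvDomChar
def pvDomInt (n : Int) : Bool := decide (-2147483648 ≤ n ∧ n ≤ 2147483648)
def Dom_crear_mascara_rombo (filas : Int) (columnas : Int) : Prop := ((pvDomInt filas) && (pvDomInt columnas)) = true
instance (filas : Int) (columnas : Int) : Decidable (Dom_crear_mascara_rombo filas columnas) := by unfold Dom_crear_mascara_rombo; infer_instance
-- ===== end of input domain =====

-- B replaces A's per-cell Manhattan-distance test by a per-row clamped column-span fill (alternative decomposition, same asymptotic cost).

-- ===== PORT A =====
def crear_mascara_rombo (filas : Int) (columnas : Int) : List (List Int) :=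
  let centro_f := PySem.Int.floordiv filas 2
  let centro_c := PySem.Int.floordiv columnas 2
  let radio := PySem.Int.floordiv (min filas columnas) 2
  let mascara := (PySem.List.pyRange 0 filas 1).map
    (fun _ => (PySem.List.pyRange 0 columnas 1).map (fun _ => (0 : Int)))
  (PySem.List.pyRange 0 filas 1).foldl (fun m i =>
    (PySem.List.pyRange 0 columnas 1).foldl (fun m j =>
      if |i - centro_f| + |j - centro_c| ≤ radio then
        PySem.List.pySetD m i (PySem.List.pySetD (PySem.List.pyGetD m i []) j 1)
      else m) m) mascara

-- ===== PORT B =====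
def crear_mascara_rombo_alt (filas : Int) (columnas : Int) : List (List Int) :=
  let centro_f := PySem.Int.floordiv filas 2
  let centro_c := PySem.Int.floordiv columnas 2
  let radio := PySem.Int.floordiv (min filas columnas) 2
  (PySem.List.pyRange 0 filas 1).foldl (fun masc i =>
    let fila0 := List.replicate columnas.toNat (0 : Int)
    let budget := radio - |i - centro_f|
    let fila :=
      if 0 ≤ budget then
        (PySem.List.pyRange (max 0 (centro_c - budget))
            (min (columnas - 1) (centro_c + budget) + 1) 1).foldl
          (fun f j => PySem.List.pySetD f j 1) fila0
      else fila0
    masc ++ [fila]) []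

-- ===== PRECONDITION & SPEC =====
def Spec_crear_mascara_rombo (filas : Int) (columnas : Int) (out : List (List Int)) : Prop := out = crear_mascara_rombo_alt filas columnas
instance (filas : Int) (columnas : Int) (out : List (List Int)) : Decidable (Spec_crear_mascara_rombo filas columnas out) := by unfold Spec_crear_mascara_rombo; infer_instance

-- ===== CLAIM (what is proved, stated in full; the proofs are below) =====
def Claim_equal_crear_mascara_rombo : Prop := ∀ (filas : Int) (columnas : Int), Dom_crear_mascara_rombo filas columnas → Spec_crear_mascara_rombo filas columnas (crear_mascara_rombo filas columnas)

-- ===== LEMMAS AND PROOFS =====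

-- the common value: row i of the mask, as a pure map
def pvRow (cf cc radio columnas : Int) (i : Nat) : List Int :=
  (List.range columnas.toNat).map
    (fun (j : Nat) => if |(i : Int) - cf| + |(j : Int) - cc| ≤ radio then 1 else 0)

lemma pv_setD_nonneg {α : Type} (l : List α) (j : Int) (hj : 0 ≤ j) (v : α) :
    PySem.List.pySetD l j v = l.set j.toNat v := by
  obtain ⟨n, rfl⟩ := Int.eq_ofNat_of_zero_le hj
  simpa using PySem.List.pySetD_natCast l n v

lemma pv_getD_nonneg {α : Type} (l : List α) (j : Int) (hj : 0 ≤ j) (d : α) :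
    PySem.List.pyGetD l j d = l.getD j.toNat d := by
  obtain ⟨n, rfl⟩ := Int.eq_ofNat_of_zero_le hj
  simpa using PySem.List.pyGetD_natCast l n d

lemma pv_getElem?_set_self {α : Type} (l : List α) (n : Nat) (a : α) :
    (l.set n a)[n]? = if n < l.length then some a else none := by
  rw [List.getElem?_set]
  split_ifs <;> simp_all

lemma pv_set_oob {α : Type} (l : List α) (n : Nat) (a : α) (h : l.length ≤ n) :
    l.set n a = l := by
  apply List.ext_getElem?
  intro t
  by_cases ht : n = t
  · subst ht
    rw [pv_getElem?_set_self, if_neg (by omega), eq_comm, List.getElem?_eq_none_iff]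
    omega
  · exact List.getElem?_set_ne ht

-- a conditional 'fila[j] = 1' loop, characterised elementwise
lemma pv_condfold (p : Int → Prop) [DecidablePred p] (js : List Int) :
    (∀ j ∈ js, 0 ≤ j) → ∀ (l : List Int) (k : Nat),
      (js.foldl (fun f j => if p j then PySem.List.pySetD f j 1 else f) l)[k]? =
      if ((k : Int) ∈ js ∧ p (k : Int) ∧ k < l.length) then some 1 else l[k]? := by
  induction js with
  | nil => intro _ l k; simp
  | cons j rest ih =>
    intro h0 l k
    have hj : 0 ≤ j := h0 j (by simp)
    rw [List.foldl_cons, ih (fun x hx => h0 x (List.mem_cons_of_mem _ hx))]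
    have hlen : (if p j then PySem.List.pySetD l j 1 else l).length = l.length := by
      split <;> simp [pv_setD_nonneg l j hj]
    rw [hlen]
    by_cases hpj : p j
    · rw [if_pos hpj, pv_setD_nonneg l j hj]
      by_cases hk : (k : Int) = j
      · have hkj : j.toNat = k := by omega
        rw [hkj, pv_getElem?_set_self]
        have hpk : p (k : Int) := hk ▸ hpj
        by_cases hlt : k < l.length
        · simp [hpk, hpj, hlt, List.mem_cons, hk]
        · have hnone : l[k]? = none := List.getElem?_eq_none_iff.mpr (by omega)
          simp [hlt, hnone]
      · have hne : j.toNat ≠ k := by omega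
        rw [List.getElem?_set_ne hne]
        simp only [List.mem_cons]
        have hiff : (((k : Int) = j ∨ (k : Int) ∈ rest)) ↔ ((k : Int) ∈ rest) := by tauto
        simp only [hiff]
    · rw [if_neg hpj]
      simp only [List.mem_cons]
      by_cases hk : (k : Int) = j
      · have hnp : ¬ p (k : Int) := hk ▸ hpj
        simp [hnp]
      · have hiff : (((k : Int) = j ∨ (k : Int) ∈ rest)) ↔ ((k : Int) ∈ rest) := by tauto
        simp only [hiff]

-- the unconditional variant (B's inner loop)
lemma pv_setfold (js : List Int) (h0 : ∀ j ∈ js, 0 ≤ j) (l : List Int) (k : Nat) :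
    (js.foldl (fun f j => PySem.List.pySetD f j 1) l)[k]? =
    if ((k : Int) ∈ js ∧ k < l.length) then some 1 else l[k]? := by
  have h := pv_condfold (fun _ => True) js h0 l k
  simpa using h

lemma pv_set_getD_self {α : Type} (m : List α) (n : Nat) (d : α) :
    m.set n (m.getD n d) = m := by
  apply List.ext_getElem?
  intro k
  by_cases h : n = k
  · subst h
    rw [pv_getElem?_set_self]
    by_cases hl : n < m.length
    · rw [if_pos hl, List.getD_eq_getElem?_getD, List.getElem?_eq_getElem hl]
      rfl
    · rw [if_neg hl, eq_comm, List.getElem?_eq_none_iff]; omega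
  · exact List.getElem?_set_ne (by omega)

-- 'mascara[i][j] = 1' over a whole inner loop = set row i once to the folded row
lemma pv_rowlift (p : Int → Prop) [DecidablePred p] (js : List Int) :
    (∀ j ∈ js, 0 ≤ j) → ∀ (m : List (List Int)) (i : Int), 0 ≤ i →
      js.foldl (fun m j => if p j then
          PySem.List.pySetD m i (PySem.List.pySetD (PySem.List.pyGetD m i []) j 1) else m) m
      = PySem.List.pySetD m i
          (js.foldl (fun r j => if p j then PySem.List.pySetD r j 1 else r)
            (PySem.List.pyGetD m i [])) := by
  induction js with
  | nil =>
    intro _ m i hi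
    rw [List.foldl_nil, List.foldl_nil, pv_setD_nonneg _ _ hi, pv_getD_nonneg _ _ hi,
      pv_set_getD_self]
  | cons j rest ih =>
    intro h0 m i hi
    have hj : 0 ≤ j := h0 j (by simp)
    have hrest : ∀ x ∈ rest, 0 ≤ x := fun x hx => h0 x (List.mem_cons_of_mem _ hx)
    rw [List.foldl_cons, List.foldl_cons]
    by_cases hpj : p j
    · rw [if_pos hpj, if_pos hpj, ih hrest _ i hi]
      have e1 : PySem.List.pyGetD
          (PySem.List.pySetD m i (PySem.List.pySetD (PySem.List.pyGetD m i []) j 1)) i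
          ([] : List Int)
          = PySem.List.pySetD (PySem.List.pyGetD m i []) j 1 := by
        simp only [pv_setD_nonneg _ _ hi, pv_setD_nonneg _ _ hj, pv_getD_nonneg _ _ hi]
        by_cases hl : i.toNat < m.length
        · rw [List.getD_eq_getElem?_getD, pv_getElem?_set_self, if_pos hl]
          rfl
        · have h2 : m.getD i.toNat ([] : List Int) = [] := by
            rw [List.getD_eq_getElem?_getD, List.getElem?_eq_none_iff.mpr (by omega)]
            rfl
          rw [pv_set_oob _ _ _ (by omega), h2]
          simp
      have e2 : ∀ y : List Int, PySem.List.pySetD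
          (PySem.List.pySetD m i (PySem.List.pySetD (PySem.List.pyGetD m i []) j 1)) i y
          = PySem.List.pySetD m i y := by
        intro y
        simp only [pv_setD_nonneg _ _ hi, pv_setD_nonneg _ _ hj, pv_getD_nonneg _ _ hi,
          List.set_set]
      rw [e1, e2]
    · rw [if_neg hpj, if_neg hpj]
      exact ih hrest m i hi

-- the outer loop: each iteration rewrites only its own row
lemma pv_outfold (g : Int → List Int → List Int) (is : List Int) :
    is.Nodup → (∀ i ∈ is, 0 ≤ i) → ∀ (m : List (List Int)) (k : Nat),
      (is.foldl (fun m i => PySem.List.pySetD m i (g i (PySem.List.pyGetD m i []))) m)[k]? =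
      if ((k : Int) ∈ is ∧ k < m.length)
        then some (g (k : Int) (PySem.List.pyGetD m (k : Int) [])) else m[k]? := by
  induction is with
  | nil => intro _ _ m k; simp
  | cons i rest ih =>
    intro hnd h0 m k
    have hi : 0 ≤ i := h0 i (by simp)
    have hrest : ∀ x ∈ rest, 0 ≤ x := fun x hx => h0 x (List.mem_cons_of_mem _ hx)
    rw [List.foldl_cons, ih (List.Nodup.of_cons hnd) hrest]
    have hlen : (PySem.List.pySetD m i (g i (PySem.List.pyGetD m i []))).length = m.length := by
      rw [pv_setD_nonneg _ _ hi]; simp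
    rw [hlen]
    by_cases hk : (k : Int) = i
    · have hkr : (k : Int) ∉ rest := by rw [hk]; exact (List.nodup_cons.mp hnd).1
      rw [if_neg (by tauto)]
      have hkn : i.toNat = k := by omega
      rw [pv_setD_nonneg _ _ hi, hkn, pv_getElem?_set_self]
      have hg : g (k : Int) (PySem.List.pyGetD m (k : Int) []) = g i (PySem.List.pyGetD m i []) := by
        rw [hk]
      by_cases hl : k < m.length
      · simp [hl, List.mem_cons, hk, hg]
      · have hnone : m[k]? = none := List.getElem?_eq_none_iff.mpr (by omega)
        simp [hl, hnone]
    · have hne : i.toNat ≠ k := by omega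
      have hgd : PySem.List.pyGetD (PySem.List.pySetD m i (g i (PySem.List.pyGetD m i []))) ((k : Nat) : Int) ([] : List Int)
          = PySem.List.pyGetD m ((k : Nat) : Int) ([] : List Int) := by
        rw [pv_setD_nonneg _ _ hi, pv_getD_nonneg _ _ (Int.natCast_nonneg k),
          pv_getD_nonneg _ _ (Int.natCast_nonneg k), List.getD_eq_getElem?_getD,
          List.getD_eq_getElem?_getD, List.getElem?_set_ne (by omega)]
      rw [hgd, pv_setD_nonneg _ _ hi, List.getElem?_set_ne hne]
      simp only [List.mem_cons]
      have hiff : (((k : Int) = i ∨ (k : Int) ∈ rest)) ↔ ((k : Int) ∈ rest) := by tauto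
      simp only [hiff]

-- nonnegativity of range indices
lemma pv_range_nonneg (b : Int) : ∀ j ∈ PySem.List.pyRange 0 b 1, (0 : Int) ≤ j := by
  intro j hj
  rw [PySem.List.mem_pyRange_one] at hj
  exact hj.1

-- pvRow, elementwise
lemma pv_row_getElem? (cf cc radio columnas : Int) (k k2 : Nat) :
    (pvRow cf cc radio columnas k)[k2]? =
    if k2 < columnas.toNat
      then some (if |(k : Int) - cf| + |(k2 : Int) - cc| ≤ radio then 1 else 0) else none := by
  unfold pvRow
  rw [List.getElem?_map]
  by_cases h : k2 < columnas.toNat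
  · have hr : (List.range columnas.toNat)[k2]? = some k2 := by simp [h]
    rw [hr]
    simp [h]
  · have hr : (List.range columnas.toNat)[k2]? = none := by
      rw [List.getElem?_eq_none_iff, List.length_range]
      omega
    rw [hr]
    simp [h]

-- the zero row is a replicate
lemma pv_zrow_eq (columnas : Int) :
    (PySem.List.pyRange 0 columnas 1).map (fun _ => (0 : Int)) =
    List.replicate columnas.toNat (0 : Int) := by
  rw [List.eq_replicate_iff]
  constructor
  · simp [PySem.List.length_pyRange_one]
  · intro b hb
    rw [List.mem_map] at hb
    obtain ⟨_, _, hb⟩ := hb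
    exact hb.symm

-- A's inner loop on the zero row computes pvRow
lemma pv_A_row (cf cc radio columnas : Int) (k : Nat) :
    (PySem.List.pyRange 0 columnas 1).foldl
      (fun r j => if |(k : Int) - cf| + |j - cc| ≤ radio then PySem.List.pySetD r j 1 else r)
      ((PySem.List.pyRange 0 columnas 1).map (fun _ => (0 : Int)))
    = pvRow cf cc radio columnas k := by
  apply List.ext_getElem?
  intro k2
  rw [pv_condfold (fun j => |(k : Int) - cf| + |j - cc| ≤ radio) _ (pv_range_nonneg columnas),
    pv_row_getElem?, pv_zrow_eq, List.length_replicate, List.getElem?_replicate]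
  simp only [PySem.List.mem_pyRange_one]
  split_ifs <;> simp_all <;> omega

-- A computes pvRow for every row
lemma pv_A_char (filas columnas : Int) :
    crear_mascara_rombo filas columnas =
    (List.range filas.toNat).map
      (pvRow (PySem.Int.floordiv filas 2) (PySem.Int.floordiv columnas 2)
        (PySem.Int.floordiv (min filas columnas) 2) columnas) := by
  simp only [crear_mascara_rombo]
  rw [PySem.List.foldl_congr_mem (PySem.List.pyRange 0 filas 1) _
    (fun m i => PySem.List.pySetD m i
      ((PySem.List.pyRange 0 columnas 1).foldl
        (fun r j => if |i - PySem.Int.floordiv filas 2| + |j - PySem.Int.floordiv columnas 2| ≤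
            PySem.Int.floordiv (min filas columnas) 2 then PySem.List.pySetD r j 1 else r)
        (PySem.List.pyGetD m i []))) _
    (fun acc i hi =>
      pv_rowlift (fun j => |i - PySem.Int.floordiv filas 2| + |j - PySem.Int.floordiv columnas 2| ≤
          PySem.Int.floordiv (min filas columnas) 2)
        (PySem.List.pyRange 0 columnas 1) (pv_range_nonneg columnas) acc i
        ((pv_range_nonneg filas) i hi))]
  apply List.ext_getElem?
  intro k
  rw [pv_outfold (fun i row => (PySem.List.pyRange 0 columnas 1).foldl
      (fun r j => if |i - PySem.Int.floordiv filas 2| + |j - PySem.Int.floordiv columnas 2| ≤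
          PySem.Int.floordiv (min filas columnas) 2 then PySem.List.pySetD r j 1 else r) row)
    (PySem.List.pyRange 0 filas 1) (PySem.List.nodup_pyRange_one 0 filas)
    (pv_range_nonneg filas)]
  have hm0len : ((PySem.List.pyRange 0 filas 1).map
      (fun _ => (PySem.List.pyRange 0 columnas 1).map (fun _ => (0 : Int)))).length = filas.toNat := by
    simp [PySem.List.length_pyRange_one]
  have hrhs : ((List.range filas.toNat).map
      (pvRow (PySem.Int.floordiv filas 2) (PySem.Int.floordiv columnas 2)
        (PySem.Int.floordiv (min filas columnas) 2) columnas))[k]? =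
      if k < filas.toNat then some (pvRow (PySem.Int.floordiv filas 2) (PySem.Int.floordiv columnas 2)
        (PySem.Int.floordiv (min filas columnas) 2) columnas k) else none := by
    rw [List.getElem?_map]
    by_cases h : k < filas.toNat
    · have hr : (List.range filas.toNat)[k]? = some k := by simp [h]
      rw [hr]
      simp [h]
    · have hr : (List.range filas.toNat)[k]? = none := by
        rw [List.getElem?_eq_none_iff, List.length_range]
        omega
      rw [hr]
      simp [h]
  rw [hrhs, hm0len]
  by_cases hk : k < filas.toNat
  · have hmem : (k : Int) ∈ PySem.List.pyRange 0 filas 1 :=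
      PySem.List.mem_pyRange_one.mpr ⟨Int.natCast_nonneg k, by omega⟩
    rw [if_pos ⟨hmem, hk⟩, if_pos hk]
    have hget : PySem.List.pyGetD ((PySem.List.pyRange 0 filas 1).map
        (fun _ => (PySem.List.pyRange 0 columnas 1).map (fun _ => (0 : Int)))) ((k : Nat) : Int) ([] : List Int)
        = (PySem.List.pyRange 0 columnas 1).map (fun _ => (0 : Int)) := by
      rw [pv_getD_nonneg _ _ (Int.natCast_nonneg k), List.getD_eq_getElem?_getD, List.getElem?_map]
      rw [List.getElem?_eq_getElem (by simpa [PySem.List.length_pyRange_one] using (by omega : k < (filas - 0).toNat))]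
      simp
    rw [hget, pv_A_row]
  · rw [if_neg (fun h => hk h.2), if_neg hk, List.getElem?_eq_none_iff, hm0len]
    omega

-- B computes pvRow for every row
lemma pv_B_char (filas columnas : Int) :
    crear_mascara_rombo_alt filas columnas =
    (List.range filas.toNat).map
      (pvRow (PySem.Int.floordiv filas 2) (PySem.Int.floordiv columnas 2)
        (PySem.Int.floordiv (min filas columnas) 2) columnas) := by
  simp only [crear_mascara_rombo_alt]
  rw [PySem.List.foldl_append_singleton_eq_map, List.nil_append, PySem.List.pyRange_one,
    List.map_map]
  simp only [sub_zero]
  apply List.map_congr_left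
  intro k hk
  rw [List.mem_range] at hk
  simp only [Function.comp_apply, zero_add]
  set cf := PySem.Int.floordiv filas 2 with hcf
  set cc := PySem.Int.floordiv columnas 2 with hcc
  set radio := PySem.Int.floordiv (min filas columnas) 2 with hrad
  by_cases hb : 0 ≤ radio - |(k : Int) - cf|
  · rw [if_pos hb]
    apply List.ext_getElem?
    intro k2
    have h0 : ∀ j ∈ PySem.List.pyRange (max 0 (cc - (radio - |(k : Int) - cf|)))
        (min (columnas - 1) (cc + (radio - |(k : Int) - cf|)) + 1) 1, (0 : Int) ≤ j := by
      intro j hj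
      rw [PySem.List.mem_pyRange_one] at hj
      have := hj.1
      omega
    rw [pv_setfold _ h0, pv_row_getElem?, List.length_replicate, List.getElem?_replicate]
    simp only [PySem.List.mem_pyRange_one]
    rw [Int.abs_eq_natAbs] at hb
    simp only [Int.abs_eq_natAbs]
    split_ifs <;> first | rfl | (exfalso; omega)
  · rw [if_neg hb]
    apply List.ext_getElem?
    intro k2
    rw [pv_row_getElem?, List.getElem?_replicate]
    rw [Int.abs_eq_natAbs] at hb
    simp only [Int.abs_eq_natAbs]
    split_ifs <;> first | rfl | (exfalso; omega)

-- ===== VERDICT (by name: the statement is the Claim_ definition above) =====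
theorem crear_mascara_rombo_spec : Claim_equal_crear_mascara_rombo := by
  intro filas columnas _
  unfold Spec_crear_mascara_rombo
  rw [pv_A_char, pv_B_char]
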